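-- pv_equiv track=rewrite | github.com/pokerdio/generic | euler/euler-623.py | application
-- ===== SOURCE A (Python) =====
-- def application(n12, v={}):
--     """application of lambda expressions with n1 and n2 free variables"""
--
--     if (n12 in v):
--         return v[n12]
--
--     n1, n2 = n12
--
--     ret = []
--     c1 = 1
--     c2 = 1
--     p = 1
--     for common_count in range(0, min(n1, n2) + 1):
--         ret.append((n1 + n2 - common_count, (c1 * c2 * p) % 1000000007))
--         c1 = c1 * (n1 - common_count) // (1 + common_count)
--         c2 = c2 * (n2 - common_count) // (1 + common_count)
--         p = p * (common_count + 1)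
--     ret = list(reversed(ret))
--     v[n12] = ret
--     return ret
-- ===== SOURCE B (Python) =====
-- def application(n12, v={}):
--     """application of lambda expressions with n1 and n2 free variables"""
--
--     if (n12 in v):
--         return v[n12]
--
--     n1, n2 = n12
--     m = min(n1, n2)
--     # prefix tables: ff1[k] = n1*(n1-1)*...*(n1-k+1), ff2[k] likewise, fact[k] = k!
--     ff1, ff2, fact = [1], [1], [1]
--     for k in range(m):
--         ff1.append(ff1[-1] * (n1 - k))
--         ff2.append(ff2[-1] * (n2 - k))
--         fact.append(fact[-1] * (k + 1))
--     ret = [(n1 + n2 - k, ff1[k] * ff2[k] // fact[k] % 1000000007)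
--            for k in range(m, -1, -1)]
--     v[n12] = ret
--     return ret
-- ===== Notes on version B (the rewrite author's own statement) =====
-- stated objective: alternative
-- what changed: Replaces A's loop that threads running binomial accumulators c1, c2, p and reverses at the end by three prefix-product tables (falling factorials and factorials) built once, then a descending list comprehension that reads each element off the tables with one exact division, producing the list directly in final order with no reverse.
import Mathlib
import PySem

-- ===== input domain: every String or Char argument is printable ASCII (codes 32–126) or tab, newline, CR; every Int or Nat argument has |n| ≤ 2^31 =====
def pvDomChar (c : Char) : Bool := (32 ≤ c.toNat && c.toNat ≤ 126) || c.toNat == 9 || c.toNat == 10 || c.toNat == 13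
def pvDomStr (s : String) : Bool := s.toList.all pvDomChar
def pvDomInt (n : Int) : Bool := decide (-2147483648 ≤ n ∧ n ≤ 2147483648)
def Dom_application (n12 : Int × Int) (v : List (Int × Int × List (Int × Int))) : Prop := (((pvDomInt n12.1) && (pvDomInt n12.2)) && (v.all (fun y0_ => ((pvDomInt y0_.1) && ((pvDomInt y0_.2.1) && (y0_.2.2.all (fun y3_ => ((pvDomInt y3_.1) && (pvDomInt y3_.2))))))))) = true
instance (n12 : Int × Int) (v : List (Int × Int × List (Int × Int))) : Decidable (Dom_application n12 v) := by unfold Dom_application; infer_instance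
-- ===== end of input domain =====

-- B replaces A's threaded binomial accumulators (c1, c2, p, reversed at the end) by three
-- prefix-product tables read off by a descending comprehension; equal return values are proved
-- (both versions mutate the cache dict v in Python; the claim is about the return value only).

-- ===== PORT A =====
-- the for-loop of A, threading (ret, c1, c2, p)
def appLoopA (n1 n2 : Int) : List Int → List (Int × Int) → Int → Int → Int → List (Int × Int)
  | [], ret, _, _, _ => ret
  | k :: ks, ret, c1, c2, p =>
      appLoopA n1 n2 ks
        (ret ++ [(n1 + n2 - k, PySem.Int.mod (c1 * c2 * p) 1000000007)])
        (PySem.Int.floordiv (c1 * (n1 - k)) (1 + k))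
        (PySem.Int.floordiv (c2 * (n2 - k)) (1 + k))
        (p * (k + 1))

def application (n12 : Int × Int) (v : List (Int × Int × List (Int × Int))) : List (Int × Int) :=
  match v.find? (fun e => e.1 == n12.1 && e.2.1 == n12.2) with
  | some e => e.2.2       -- if n12 in v: return v[n12]
  | none =>
      (appLoopA n12.1 n12.2 (PySem.List.pyRange 0 (min n12.1 n12.2 + 1) 1) [] 1 1 1).reverse

-- ===== PORT B =====
-- the table-building loop of B; the tables start as [1] so list[-1] is always defined
def appTablesB (n1 n2 : Int) : List Int → List Int → List Int → List Int → List Int × List Int × List Int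
  | [], f1, f2, fa => (f1, f2, fa)
  | k :: ks, f1, f2, fa =>
      appTablesB n1 n2 ks
        (f1 ++ [PySem.List.pyGetD f1 (-1) 0 * (n1 - k)])
        (f2 ++ [PySem.List.pyGetD f2 (-1) 0 * (n2 - k)])
        (fa ++ [PySem.List.pyGetD fa (-1) 0 * (k + 1)])

def application_alt (n12 : Int × Int) (v : List (Int × Int × List (Int × Int))) : List (Int × Int) :=
  match v.find? (fun e => e.1 == n12.1 && e.2.1 == n12.2) with
  | some e => e.2.2       -- if n12 in v: return v[n12]
  | none =>
      let n1 := n12.1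
      let n2 := n12.2
      let m := min n1 n2
      let t := appTablesB n1 n2 (PySem.List.pyRange 0 m 1) [1] [1] [1]
      (PySem.List.pyRange m (-1) (-1)).map (fun k =>
        (n1 + n2 - k,
         PySem.Int.mod
           (PySem.Int.floordiv (PySem.List.pyGetD t.1 k 0 * PySem.List.pyGetD t.2.1 k 0)
             (PySem.List.pyGetD t.2.2 k 0)) 1000000007))

-- ===== PRECONDITION & SPEC =====
def Spec_application (n12 : Int × Int) (v : List (Int × Int × List (Int × Int))) (out : List (Int × Int)) : Prop := out = application_alt n12 v
instance (n12 : Int × Int) (v : List (Int × Int × List (Int × Int))) (out : List (Int × Int)) : Decidable (Spec_application n12 v out) := by unfold Spec_application; infer_instance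

-- ===== CLAIM (what is proved, stated in full; the proofs are below) =====
def Claim_equal_application : Prop := ∀ (n12 : Int × Int) (v : List (Int × Int × List (Int × Int))), Dom_application n12 v → Spec_application n12 v (application n12 v)

-- ===== LEMMAS AND PROOFS =====

-- falling factorial n*(n-1)*...*(n-k+1) over Int, and k! over Int
def ffI (n : Int) : Nat → Int
  | 0 => 1
  | i + 1 => ffI n i * (n - i)

def factI : Nat → Int
  | 0 => 1
  | i + 1 => factI i * ((i : Int) + 1)

-- the common element value at index k, for nonnegative inputs
def gE (n1 n2 : Nat) (k : Nat) : Int × Int :=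
  ((n1 : Int) + n2 - k,
   PySem.Int.mod ((n1.choose k * n2.choose k * k.factorial : Nat) : Int) 1000000007)

lemma ffI_natCast (n : Nat) : ∀ k, ffI (n : Int) k = (n.descFactorial k : Int) := by
  intro k
  induction k with
  | zero => simp [ffI]
  | succ i ih =>
      rw [ffI, ih, Nat.descFactorial_succ]
      by_cases h : i ≤ n
      · push_cast [h]; ring
      · have h0 : n.descFactorial i = 0 := by
          rw [Nat.descFactorial_eq_zero_iff_lt]; omega
        have h1 : n - i = 0 := by omega
        rw [h0, h1]; push_cast; ring

lemma factI_cast : ∀ k, factI k = (k.factorial : Int) := by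
  intro k
  induction k with
  | zero => simp [factI]
  | succ i ih => rw [factI, ih, Nat.factorial_succ]; push_cast; ring

lemma chooseStep (n k : Nat) (hk : k ≤ n) :
    PySem.Int.floordiv ((n.choose k : Int) * ((n : Int) - k)) (1 + k) = (n.choose (k + 1) : Int) := by
  have h1 : ((n : Int) - k) = ((n - k : Nat) : Int) := by omega
  have h2 : (1 + (k : Int)) = ((1 + k : Nat) : Int) := by push_cast; ring
  rw [h1, h2, ← Nat.cast_mul, PySem.Int.floordiv_natCast]
  congr 1
  rw [← Nat.choose_succ_right_eq]
  have : 1 + k = k + 1 := by omega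
  rw [this, Nat.mul_div_cancel _ (by omega)]

lemma loopA_eq (n1 n2 : Nat) : ∀ (d k : Nat) (acc : List (Int × Int)),
    ((k : Int) + d = min (n1 : Int) (n2 : Int) + 1) →
    appLoopA (n1 : Int) (n2 : Int)
      (PySem.List.pyRange (k : Int) (min (n1 : Int) (n2 : Int) + 1) 1) acc
      (n1.choose k) (n2.choose k) (k.factorial)
    = acc ++ (List.range d).map (fun i => gE n1 n2 (k + i)) := by
  intro d
  induction d with
  | zero =>
      intro k acc hk
      rw [PySem.List.pyRange_one_eq_nil (by omega)]
      simp [appLoopA]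
  | succ d ih =>
      intro k acc hk
      have hkm : (k : Int) ≤ min (n1 : Int) (n2 : Int) := by omega
      have hk1 : k ≤ n1 := by omega
      have hk2 : k ≤ n2 := by omega
      rw [PySem.List.pyRange_one_cons (by omega)]
      rw [appLoopA]
      rw [chooseStep n1 k hk1, chooseStep n2 k hk2]
      have hp : (k.factorial : Int) * ((k : Int) + 1) = ((k + 1).factorial : Int) := by
        rw [Nat.factorial_succ]; push_cast; ring
      rw [hp]
      have hkk : ((k : Int) + 1) = (((k + 1 : Nat)) : Int) := by push_cast; ring
      rw [hkk, ih (k + 1) _ (by push_cast; omega)]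
      rw [List.append_assoc]
      congr 1
      rw [List.range_succ_eq_map, List.map_cons, List.map_map]
      have h2 : (List.range d).map ((fun i => gE n1 n2 (k + i)) ∘ Nat.succ)
          = (List.range d).map (fun i => gE n1 n2 (k + 1 + i)) := by
        apply List.map_congr_left
        intro i _
        simp only [Function.comp_apply]
        congr 1
        omega
      rw [h2]
      congr 1

lemma appTablesB_append (n1 n2 : Int) : ∀ (xs ys : List Int) (f1 f2 fa : List Int),
    appTablesB n1 n2 (xs ++ ys) f1 f2 fa
    = appTablesB n1 n2 ys (appTablesB n1 n2 xs f1 f2 fa).1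
        (appTablesB n1 n2 xs f1 f2 fa).2.1 (appTablesB n1 n2 xs f1 f2 fa).2.2 := by
  intro xs
  induction xs with
  | nil => intro ys f1 f2 fa; simp [appTablesB]
  | cons x xs ih => intro ys f1 f2 fa; rw [List.cons_append, appTablesB, appTablesB, ih]

lemma tablesB_eq (n1 n2 : Int) : ∀ (j : Nat),
    appTablesB n1 n2 (PySem.List.pyRange 0 (j : Int) 1) [1] [1] [1]
    = ((List.range (j + 1)).map (ffI n1), (List.range (j + 1)).map (ffI n2),
       (List.range (j + 1)).map factI) := by
  intro j
  induction j with
  | zero => simp [appTablesB, ffI, factI]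
  | succ j ih =>
      have hsplit : PySem.List.pyRange 0 ((j + 1 : Nat) : Int) 1
          = PySem.List.pyRange 0 (j : Int) 1 ++ [(j : Int)] := by
        have : ((j + 1 : Nat) : Int) = (j : Int) + 1 := by push_cast; ring
        rw [this, PySem.List.pyRange_one_succ_right (by omega)]
      rw [hsplit, appTablesB_append, ih]
      rw [appTablesB, appTablesB]
      have hlast : ∀ (f : Nat → Int),
          PySem.List.pyGetD ((List.range (j + 1)).map f) (-1) 0 = f j := by
        intro f
        rw [List.range_succ, List.map_append, List.map_singleton,
          PySem.List.pyGetD_neg_one_append_singleton]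
      rw [hlast, hlast, hlast]
      have hext : ∀ (f : Nat → Int) (x : Int), f (j + 1) = x →
          (List.range (j + 1)).map f ++ [x] = (List.range (j + 1 + 1)).map f := by
        intro f x hx
        rw [List.range_succ (n := j + 1), List.map_append, List.map_singleton, hx]
      dsimp only
      rw [hext (ffI n1) _ (by rw [ffI]), hext (ffI n2) _ (by rw [ffI]),
        hext factI _ (by rw [factI])]

lemma divPoint (N1 N2 : Nat) (i : Nat) :
    PySem.Int.floordiv (ffI (N1 : Int) i * ffI (N2 : Int) i) (factI i)
    = ((N1.choose i * N2.choose i * i.factorial : Nat) : Int) := by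
  rw [ffI_natCast, ffI_natCast, factI_cast, ← Nat.cast_mul, PySem.Int.floordiv_natCast]
  congr 1
  rw [Nat.descFactorial_eq_factorial_mul_choose, Nat.descFactorial_eq_factorial_mul_choose]
  have h : i.factorial * N1.choose i * (i.factorial * N2.choose i)
      = (N1.choose i * N2.choose i * i.factorial) * i.factorial := by ring
  rw [h, Nat.mul_div_cancel _ (Nat.factorial_pos i)]

theorem application_spec : Claim_equal_application := by
  unfold Claim_equal_application
  intro n12 v _
  unfold Spec_application application application_alt
  cases hf : v.find? (fun e => e.1 == n12.1 && e.2.1 == n12.2) with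
  | some e => rfl
  | none =>
    obtain ⟨n1, n2⟩ := n12
    dsimp only
    by_cases hm : 0 ≤ min n1 n2
    · obtain ⟨N1, rfl⟩ := Int.eq_ofNat_of_zero_le (le_trans hm (min_le_left n1 n2))
      obtain ⟨N2, rfl⟩ := Int.eq_ofNat_of_zero_le (le_trans hm (min_le_right _ n2))
      have hmin : min ((N1 : Int)) ((N2 : Int)) = ((min N1 N2 : Nat) : Int) := by
        simp [Nat.cast_min]
      set mN := min N1 N2 with hmN
      -- A side
      have hA := loopA_eq N1 N2 (mN + 1) 0 [] (by rw [hmin]; push_cast; ring)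
      simp only [Nat.choose_zero_right, Nat.factorial_zero, Nat.cast_one, Nat.cast_zero,
        List.nil_append, Nat.zero_add] at hA
      rw [hmin] at hA ⊢
      rw [hA]
      -- B side
      rw [tablesB_eq]
      rw [PySem.List.pyRange_neg_one_eq_reverse]
      have hzero : ((-1 : Int) + 1) = ((0 : Nat) : Int) := by norm_num
      rw [hzero]
      rw [List.map_reverse]
      congr 1
      rw [PySem.List.pyRange_one]
      rw [List.map_map]
      have hlen : ((((mN : Int)) + 1 - ((0 : Nat) : Int))).toNat = mN + 1 := by omega
      rw [hlen]
      apply List.map_congr_left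
      intro i hi
      have hi' : i < mN + 1 := List.mem_range.mp hi
      have hgd : ∀ (f : Nat → Int),
          PySem.List.pyGetD ((List.range (mN + 1)).map f) (((0 : Nat) : Int) + i) 0 = f i := by
        intro f
        have : (((0 : Nat) : Int)) + i = ((i : Nat) : Int) := by push_cast; ring
        rw [this, PySem.List.pyGetD_natCast]
        simp [List.getD, List.getElem?_map, List.getElem?_range hi']
      simp only [Function.comp_apply]
      rw [hgd, hgd, hgd, divPoint]
      unfold gE
      push_cast
      norm_num
    · -- min n1 n2 < 0: both loops are empty
      rw [PySem.List.pyRange_one_eq_nil (by omega), PySem.List.pyRange_neg_one_eq_nil (by omega)]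
      simp [appLoopA]
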